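-- pv_equiv track=rewrite | github.com/barkhatnat/ITMO_UNIVERSITY | lab1/12(1 point)/task_12_2.py | counter
-- ===== SOURCE A (Python) =====
-- def counter(S):
--     first_part = []
--     second_part = []
--     for i in sorted(S, reverse=True):
--         if sum(S) // 2 >= sum(first_part) + i:
--             first_part.append(i)
--         else:
--             second_part.append(i)
--     return first_part
-- ===== SOURCE B (Python) =====
-- def counter(S):
--     # Selection by repeated max-extraction from a shrinking pool, spending a
--     # remaining budget, instead of sorting first and re-summing both parts.
--     budget = sum(S) // 2
--     pool = list(S)
--     first_part = []
--     while pool: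
--         m = max(pool)
--         pool.remove(m)
--         if m <= budget:
--             first_part.append(m)
--             budget -= m
--     return first_part
-- ===== Notes on version B (the rewrite author's own statement) =====
-- stated objective: alternative
-- what changed: Replaces A's sort-then-scan with per-iteration re-summing of S and first_part by repeated max-extraction from a shrinking pool (no sort call) driven by a decreasing remaining-budget accumulator.
import Mathlib
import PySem

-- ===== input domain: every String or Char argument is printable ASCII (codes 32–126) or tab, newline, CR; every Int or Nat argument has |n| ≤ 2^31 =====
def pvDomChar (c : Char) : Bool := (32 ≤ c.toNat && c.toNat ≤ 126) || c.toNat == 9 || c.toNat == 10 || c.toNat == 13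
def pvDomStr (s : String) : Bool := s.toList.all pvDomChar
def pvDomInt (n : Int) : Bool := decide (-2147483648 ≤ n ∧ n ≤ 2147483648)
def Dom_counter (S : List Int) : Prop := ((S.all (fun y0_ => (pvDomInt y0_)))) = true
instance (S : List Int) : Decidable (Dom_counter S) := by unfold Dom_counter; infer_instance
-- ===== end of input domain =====

-- B selects elements by repeated max-extraction from a shrinking pool with a decreasing
-- remaining-budget accumulator, instead of A's sort-then-scan re-summing S and first_part
-- each iteration (objective: alternative; no speed claim).

-- ===== PORT A =====
-- for i in sorted(S, reverse=True): append to first_part/second_part, re-summing each time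
def counterLoopA (S : List Int) : List Int → List Int → List Int → List Int × List Int
  | [], fp, sp => (fp, sp)
  | i :: rest, fp, sp =>
    if PySem.Int.floordiv S.sum 2 ≥ fp.sum + i then counterLoopA S rest (fp ++ [i]) sp
    else counterLoopA S rest fp (sp ++ [i])

def counter (S : List Int) : List Int :=
  (counterLoopA S (PySem.List.sorted S (fun x => x) true) [] []).1

-- ===== PORT B =====
-- while pool: m = max(pool); pool.remove(m); spend budget.
-- max(pool) is PySem.List.max? (none exactly when pool is empty = the while-guard);
-- list.remove of a member is List.erase (PySem.List.remove?_eq_some_erase).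
def counterLoopB (pool : List Int) (budget : Int) (fp : List Int) : List Int :=
  match h : PySem.List.max? pool (fun y => y) with
  | none => fp
  | some m =>
    if m ≤ budget then counterLoopB (pool.erase m) (budget - m) (fp ++ [m])
    else counterLoopB (pool.erase m) budget fp
termination_by pool.length
decreasing_by
  all_goals
    have hm := PySem.List.max?_mem h
    rw [List.length_erase_of_mem hm]
    have := List.length_pos_of_mem hm
    omega

def counter_alt (S : List Int) : List Int :=
  counterLoopB S (PySem.Int.floordiv S.sum 2) []

-- ===== PRECONDITION & SPEC =====
def Spec_counter (S : List Int) (out : List Int) : Prop := out = counter_alt S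
instance (S : List Int) (out : List Int) : Decidable (Spec_counter S out) := by unfold Spec_counter; infer_instance

-- ===== CLAIM =====
def Claim_equal_counter : Prop := ∀ (S : List Int), Dom_counter S → Spec_counter S (counter S)

-- ===== LEMMAS AND PROOFS =====

-- Extracting the max from the front of the descending sort: sorted(pool, reverse=True)
-- is max(pool) followed by the descending sort of pool minus one occurrence of that max.
theorem sortedDesc_cons_max (pool : List Int) (m : Int)
    (h : PySem.List.max? pool (fun y => y) = some m) :
    PySem.List.sorted pool (fun x => x) true
      = m :: PySem.List.sorted (pool.erase m) (fun x => x) true := by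
  have hm : m ∈ pool := PySem.List.max?_mem h
  have hmax : ∀ y ∈ pool, y ≤ m := fun y hy => PySem.List.max?_isMax h y hy
  have hperm : (PySem.List.sorted pool (fun x => x) true).Perm
      (m :: PySem.List.sorted (pool.erase m) (fun x => x) true) :=
    (PySem.List.sorted_perm ..).trans
      ((List.perm_cons_erase hm).trans (List.Perm.cons m (PySem.List.sorted_perm ..).symm))
  have h1 : (PySem.List.sorted pool (fun x => x) true).Pairwise (fun a b => b ≤ a) :=
    PySem.List.sorted_pairwise_rev ..
  have h2 : (m :: PySem.List.sorted (pool.erase m) (fun x => x) true).Pairwise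
      (fun a b => b ≤ a) := by
    refine List.Pairwise.cons ?_ (PySem.List.sorted_pairwise_rev ..)
    intro y hy
    exact hmax y (List.mem_of_mem_erase ((PySem.List.mem_sorted ..).mp hy))
  exact hperm.eq_of_pairwise (fun a b _ _ x y => le_antisymm y x) h1 h2

-- A's loop over the descending sort of the pool ≡ B's max-extraction loop,
-- with budget = half − sum(first_part).
theorem loopA_eq_loopB (S : List Int) (pool fp sp : List Int) (budget : Int)
    (hb : budget = PySem.Int.floordiv S.sum 2 - fp.sum) :
    (counterLoopA S (PySem.List.sorted pool (fun x => x) true) fp sp).1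
      = counterLoopB pool budget fp := by
  induction hn : pool.length using Nat.strong_induction_on generalizing pool fp sp budget with
  | _ n ih =>
  unfold counterLoopB
  match h : PySem.List.max? pool (fun y => y) with
  | none =>
    have : pool = [] := (PySem.List.max?_eq_none_iff ..).mp h
    subst this
    simp [PySem.List.sorted, counterLoopA]
  | some m =>
    have hm : m ∈ pool := PySem.List.max?_mem h
    have hlt : (pool.erase m).length < n := by
      rw [List.length_erase_of_mem hm]
      have := List.length_pos_of_mem hm
      omega
    rw [sortedDesc_cons_max pool m h]
    simp only [counterLoopA]
    by_cases hc : m ≤ budget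
    · rw [if_pos (by omega : PySem.Int.floordiv S.sum 2 ≥ fp.sum + m), if_pos hc]
      exact ih _ hlt (pool.erase m) (fp ++ [m]) sp (budget - m) (by simp [hb]; ring) rfl
    · rw [if_neg (by omega), if_neg hc]
      exact ih _ hlt (pool.erase m) fp (sp ++ [m]) budget hb rfl

-- ===== VERDICT =====
theorem counter_spec : Claim_equal_counter := by
  intro S _
  unfold Spec_counter counter counter_alt
  exact loopA_eq_loopB S S [] [] _ (by simp)
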